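-- pv_equiv track=rewrite | github.com/Mrassimo/ahgd | tests/test_automation_suite.py | _extract_test_count
-- ===== SOURCE A (Python) =====
-- from typing import Dict, List, Any, Optional
--
-- def _extract_test_count(stdout: str) -> Dict[str, int]:
--     """Extract test count information from pytest output"""
--     counts = {'passed': 0, 'failed': 0, 'error': 0, 'skipped': 0}
--
--     # Parse pytest output for test counts
--     for line in stdout.split('\n'):
--         if 'passed' in line and 'failed' in line:
--             # Extract counts from summary line
--             parts = line.split()
--             for i, part in enumerate(parts):
--                 if part.isdigit():
--                     if i + 1 < len(parts):
--                         status = parts[i + 1].lower().rstrip(',')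
--                         if status in counts:
--                             counts[status] = int(part)
--
--     return counts
-- ===== SOURCE B (Python) =====
-- def _extract_test_count(stdout: str):
--     """Extract test count information from pytest output"""
--     # Collect every (status, count) candidate pair from summary lines, then
--     # build the result per key by taking the last candidate (last-wins).
--     candidates = []
--     for line in stdout.split('\n'):
--         if 'passed' in line and 'failed' in line:
--             parts = line.split()
--             candidates.extend((nxt.lower().rstrip(','), int(num))
--                               for num, nxt in zip(parts, parts[1:])
--                               if num.isdigit())
--     return {k: next((v for s, v in reversed(candidates) if s == k), 0)
--             for k in ('passed', 'failed', 'error', 'skipped')}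
-- ===== Notes on version B (the rewrite author's own statement) =====
-- stated objective: alternative
-- what changed: Instead of mutating a dict while walking each summary line with enumerate and index lookups, B flattens all adjacent (number, word) token pairs into one candidate stream and builds the result per key by a backwards first-match (last-wins), so no dict is threaded through the loops.
import Mathlib
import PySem

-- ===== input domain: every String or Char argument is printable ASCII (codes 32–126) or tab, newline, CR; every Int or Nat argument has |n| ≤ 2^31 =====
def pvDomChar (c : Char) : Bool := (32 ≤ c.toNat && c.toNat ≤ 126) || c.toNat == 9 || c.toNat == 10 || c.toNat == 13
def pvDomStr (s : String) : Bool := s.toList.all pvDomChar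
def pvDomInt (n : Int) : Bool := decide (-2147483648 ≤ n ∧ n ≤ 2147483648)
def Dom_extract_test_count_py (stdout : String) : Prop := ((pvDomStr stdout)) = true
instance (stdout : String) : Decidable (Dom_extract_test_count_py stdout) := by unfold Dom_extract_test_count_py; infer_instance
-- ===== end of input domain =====

set_option maxRecDepth 4096

-- B re-implements the parser as: collect all (status, count) candidate pairs from the
-- summary lines into one flat stream, then build the four-key result by a per-key
-- backwards first-match (same values; a different decomposition, not faster).

-- ===== PORT A =====
-- s.rstrip(',') — hand port (PySem has no rstrip-with-chars); exact: drops trailing ','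
def pvRstripComma (s : String) : String :=
  String.ofList ((s.toList.reverse.dropWhile (fun c => c == ',')).reverse)

-- inner loop body: 'for i, part in enumerate(parts): …'
def pvA_inner (parts : List String) (counts : PySem.Dict String Int) (ip : Int × String) :
    PySem.Dict String Int :=
  if PySem.Str.strIsdigit ip.2 then
    if ip.1 + 1 < PySem.List.len parts then
      -- parts[i+1]: in range by the guard, so the pyGetD default is unreachable
      let status := pvRstripComma (PySem.Str.lower (PySem.List.pyGetD parts (ip.1 + 1) ""))
      -- int(part): part.isdigit() holds here, so int() never raises; getD unreachable
      if counts.contains status then counts.insert status ((PySem.Int.ofStr? ip.2).getD 0)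
      else counts
    else counts
  else counts

-- per-line body: "for line in stdout.split('\n'): …"
def pvA_line (counts : PySem.Dict String Int) (line : String) : PySem.Dict String Int :=
  if PySem.Str.isIn "passed" line && PySem.Str.isIn "failed" line then
    let parts := PySem.Str.split₀ line
    (PySem.List.enumerate parts).foldl (pvA_inner parts) counts
  else counts

def extract_test_count_py (stdout : String) : List (String × Int) :=
  (((PySem.Str.split? stdout "\n").getD []).foldl pvA_line
    (PySem.Dict.ofList [("passed", 0), ("failed", 0), ("error", 0), ("skipped", 0)])).items

-- ===== PORT B =====
-- per-line candidate collection: zip(parts, parts[1:]) filtered on isdigit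
def pvB_cands (acc : List (String × Int)) (line : String) : List (String × Int) :=
  if PySem.Str.isIn "passed" line && PySem.Str.isIn "failed" line then
    let parts := PySem.Str.split₀ line
    acc ++ ((parts.zip (PySem.List.slice parts (some 1) none)).filter
              (fun p => PySem.Str.strIsdigit p.1)).map
            (fun p => (pvRstripComma (PySem.Str.lower p.2), (PySem.Int.ofStr? p.1).getD 0))
  else acc

def extract_test_count_py_alt (stdout : String) : List (String × Int) :=
  let candidates := ((PySem.Str.split? stdout "\n").getD []).foldl pvB_cands []
  ["passed", "failed", "error", "skipped"].map (fun k =>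
    (k, ((candidates.reverse.find? (fun c => c.1 == k)).map (·.2)).getD 0))

-- ===== PRECONDITION & SPEC =====
def Spec_extract_test_count_py (stdout : String) (out : List (String × Int)) : Prop :=
  out = extract_test_count_py_alt stdout
instance (stdout : String) (out : List (String × Int)) :
    Decidable (Spec_extract_test_count_py stdout out) := by
  unfold Spec_extract_test_count_py; infer_instance

-- ===== CLAIM (what is proved, stated in full; the proofs are below) =====
def Claim_equal_extract_test_count_py : Prop :=
  ∀ (stdout : String), Dom_extract_test_count_py stdout →
    Spec_extract_test_count_py stdout (extract_test_count_py stdout)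

-- ===== LEMMAS AND PROOFS =====

-- the candidate list B extracts from one summary line, stated with List.tail
def pvCandsOf (parts : List String) : List (String × Int) :=
  ((parts.zip parts.tail).filter (fun p => PySem.Str.strIsdigit p.1)).map
    (fun p => (pvRstripComma (PySem.Str.lower p.2), (PySem.Int.ofStr? p.1).getD 0))

-- applying one candidate to the running dict (A's update action)
def pvStep (d : PySem.Dict String Int) (c : String × Int) : PySem.Dict String Int :=
  if d.contains c.1 then d.insert c.1 c.2 else d

-- last candidate for key k, default dflt (B's per-key backwards first match)
def pvLast (cs : List (String × Int)) (dflt : Int) (k : String) : Int :=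
  ((cs.reverse.find? (fun c => c.1 == k)).map (·.2)).getD dflt

lemma pvSlice_one (l : List String) : PySem.List.slice l (some 1) none = l.tail := by
  cases l with
  | nil => rfl
  | cons x xs => simp [PySem.List.slice]

-- parts[i+1] at i = |pre| in pre ++ x :: y :: r' is y
lemma pvGetNext (pre : List String) (x y : String) (r' : List String) :
    PySem.List.pyGetD (pre ++ x :: y :: r') ((pre.length : Int) + 1) "" = y := by
  have h : ((pre.length : Int) + 1) = ((pre.length + 1 : Nat) : Int) := by push_cast; ring
  rw [h, PySem.List.pyGetD_natCast, show pre ++ x :: y :: r' = (pre ++ [x]) ++ y :: r' by simp]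
  rw [List.getD_eq_getElem?_getD, List.getElem?_append_right (by simp)]
  simp

-- crux: A's index-based inner loop over a suffix equals folding B's zip candidates
lemma pvInner (suf : List String) : ∀ (pre : List String) (d : PySem.Dict String Int),
    (PySem.List.enumerate suf (pre.length : Int)).foldl (pvA_inner (pre ++ suf)) d
      = (pvCandsOf suf).foldl pvStep d := by
  induction suf with
  | nil => intro pre d; simp [pvCandsOf, PySem.List.enumerate]
  | cons x rest ih =>
    intro pre d
    rw [PySem.List.enumerate_cons]
    simp only [List.foldl_cons]
    have hcast : (pre.length : Int) + 1 = (((pre ++ [x]).length : Nat) : Int) := by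
      simp
    have hA : pre ++ x :: rest = (pre ++ [x]) ++ rest := by simp
    rw [hcast, hA, ih (pre ++ [x]), ← hA]
    cases rest with
    | nil => simp [pvCandsOf, pvA_inner]
    | cons y r' =>
      have hg : ((pre.length : Int) + 1 < PySem.List.len (pre ++ x :: y :: r')) := by
        simp [PySem.List.len_eq]
      by_cases hd : PySem.Str.strIsdigit x
      · simp only [pvCandsOf, List.tail_cons, List.zip_cons_cons, List.filter_cons, hd,
          if_true, List.map_cons, List.foldl_cons]
        congr 1
        simp only [pvA_inner, hd, if_true]
        rw [if_pos hg, pvGetNext]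
        rfl
      · simp only [pvCandsOf, List.tail_cons, List.zip_cons_cons, List.filter_cons, hd]
        simp only [pvA_inner, hd]
        rfl

-- A's whole dict loop = folding pvStep over B's flat candidate stream
lemma pvOuter (lines : List String) : ∀ (acc : List (String × Int)) (d : PySem.Dict String Int),
    lines.foldl pvA_line (acc.foldl pvStep d) = (lines.foldl pvB_cands acc).foldl pvStep d := by
  induction lines with
  | nil => intro acc d; rfl
  | cons ln ls ih =>
    intro acc d
    simp only [List.foldl_cons]
    rw [← ih]
    congr 1
    by_cases g : (PySem.Str.isIn "passed" ln && PySem.Str.isIn "failed" ln) = true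
    · simp only [pvA_line, pvB_cands, g, if_true, pvSlice_one, List.foldl_append]
      have := pvInner (PySem.Str.split₀ ln) [] (acc.foldl pvStep d)
      simpa [pvCandsOf] using this
    · simp only [pvA_line, pvB_cands, g, Bool.false_eq_true, if_false]

-- folding updates over the 4-key dict yields the per-key last-wins table
lemma pvFinal (cs : List (String × Int)) : ∀ (a b c e : Int),
    (cs.foldl pvStep (PySem.Dict.mk
        [("passed", a), ("failed", b), ("error", c), ("skipped", e)])).items
      = [("passed", pvLast cs a "passed"), ("failed", pvLast cs b "failed"),
         ("error", pvLast cs c "error"), ("skipped", pvLast cs e "skipped")] := by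
  induction cs with
  | nil => intro a b c e; simp [pvLast, PySem.Dict.items]
  | cons p rest ih =>
    intro a b c e
    have hlast : ∀ (k : String) (dflt : Int), pvLast (p :: rest) dflt k
        = pvLast rest (if p.1 == k then p.2 else dflt) k := by
      intro k dflt
      simp only [pvLast, List.reverse_cons, List.find?_append]
      cases h : rest.reverse.find? (fun c => c.1 == k) with
      | some v => simp [h]
      | none => cases hk : (p.1 == k) <;> simp [h, hk, List.find?]
    simp only [List.foldl_cons]
    by_cases h1 : p.1 = "passed"
    · rw [show pvStep (PySem.Dict.mk [("passed", a), ("failed", b), ("error", c), ("skipped", e)]) p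
          = PySem.Dict.mk [("passed", p.2), ("failed", b), ("error", c), ("skipped", e)] by
        simp [pvStep, h1, PySem.Dict.contains, PySem.Dict.insert]]
      rw [ih, hlast, hlast, hlast, hlast]
      simp [h1]
    by_cases h2 : p.1 = "failed"
    · rw [show pvStep (PySem.Dict.mk [("passed", a), ("failed", b), ("error", c), ("skipped", e)]) p
          = PySem.Dict.mk [("passed", a), ("failed", p.2), ("error", c), ("skipped", e)] by
        simp [pvStep, h2, PySem.Dict.contains, PySem.Dict.insert]]
      rw [ih, hlast, hlast, hlast, hlast]
      simp [h2]
    by_cases h3 : p.1 = "error"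
    · rw [show pvStep (PySem.Dict.mk [("passed", a), ("failed", b), ("error", c), ("skipped", e)]) p
          = PySem.Dict.mk [("passed", a), ("failed", b), ("error", p.2), ("skipped", e)] by
        simp [pvStep, h3, PySem.Dict.contains, PySem.Dict.insert]]
      rw [ih, hlast, hlast, hlast, hlast]
      simp [h3]
    by_cases h4 : p.1 = "skipped"
    · rw [show pvStep (PySem.Dict.mk [("passed", a), ("failed", b), ("error", c), ("skipped", e)]) p
          = PySem.Dict.mk [("passed", a), ("failed", b), ("error", c), ("skipped", p.2)] by
        simp [pvStep, h4, PySem.Dict.contains, PySem.Dict.insert]]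
      rw [ih, hlast, hlast, hlast, hlast]
      simp [h4]
    · rw [show pvStep (PySem.Dict.mk [("passed", a), ("failed", b), ("error", c), ("skipped", e)]) p
          = PySem.Dict.mk [("passed", a), ("failed", b), ("error", c), ("skipped", e)] by
        simp [pvStep, PySem.Dict.contains]
        rintro (h|h|h|h) <;> [exact absurd h.symm h1; exact absurd h.symm h2;
          exact absurd h.symm h3; exact absurd h.symm h4]]
      rw [ih, hlast, hlast, hlast, hlast]
      have e1 : (p.1 == "passed") = false := by simp [h1]
      have e2 : (p.1 == "failed") = false := by simp [h2]
      have e3 : (p.1 == "error") = false := by simp [h3]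
      have e4 : (p.1 == "skipped") = false := by simp [h4]
      simp only [e1, e2, e3, e4, Bool.false_eq_true, if_false]

-- ===== VERDICT (by name: the statement is the Claim_ definition above) =====
theorem extract_test_count_py_spec : Claim_equal_extract_test_count_py := by
  intro stdout _
  show extract_test_count_py stdout = extract_test_count_py_alt stdout
  unfold extract_test_count_py extract_test_count_py_alt
  have h0 : PySem.Dict.ofList [("passed", (0:Int)), ("failed", 0), ("error", 0), ("skipped", 0)]
      = PySem.Dict.mk [("passed", 0), ("failed", 0), ("error", 0), ("skipped", 0)] := by decide
  rw [h0]
  have := pvOuter ((PySem.Str.split? stdout "\n").getD []) []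
    (PySem.Dict.mk [("passed", 0), ("failed", 0), ("error", 0), ("skipped", 0)])
  simp only [List.foldl_nil] at this
  rw [this, pvFinal]
  simp [pvLast, List.map]
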